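-- pv_equiv track=rewrite | github.com/weikangg/BC3412_Consulting | utils/utils.py | extract_metric_name
-- ===== SOURCE A (Python) =====
-- def extract_metric_name(full_metric_key):
--     """
--     Given a full metric key in the format:
--       {comp_name}_{metric_type}_{metric_name}
--     where metric_type is one of: SASB_Metrics, Environment, Social, Governance, or Financial,
--     return the metric_name portion.
--     """
--     parts = full_metric_key.split('_')
--     metric_types = {"SASB", "Environment", "Social", "Governance", "Financial"}
--     for i, part in enumerate(parts):
--         if part in metric_types:
--             # If using SASB_Metrics, skip the next token as well.
--             if part == "SASB" and i+1 < len(parts) and parts[i+1] == "Metrics":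
--                 return " ".join(parts[i+2:])
--             return " ".join(parts[i+1:])
--     return full_metric_key
-- ===== SOURCE B (Python) =====
-- def extract_metric_name(full_metric_key):
--     """
--     Return the metric_name portion of {comp_name}_{metric_type}_{metric_name}.
--
--     Different strategy from a token scan: for each marker query its first
--     position in the token list (list.index), take the minimum of those
--     positions, and slice once from there.  The leftmost marker token is
--     exactly the minimum over the markers' first occurrences.
--     """
--     parts = full_metric_key.split('_')
--     markers = ("SASB", "Environment", "Social", "Governance", "Financial")
--     hits = [parts.index(m) for m in markers if m in parts]
--     if not hits:
--         return full_metric_key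
--     i = min(hits)
--     skip = 2 if parts[i] == "SASB" and parts[i+1:i+2] == ["Metrics"] else 1
--     return " ".join(parts[i+skip:])
-- ===== Notes on version B (the rewrite author's own statement) =====
-- stated objective: alternative
-- what changed: B replaces A's single left-to-right enumerate scan for the first marker token with per-marker first-position queries (list.index for each of the five markers) whose minimum is the leftmost marker position, then slices once from there.
import Mathlib
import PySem

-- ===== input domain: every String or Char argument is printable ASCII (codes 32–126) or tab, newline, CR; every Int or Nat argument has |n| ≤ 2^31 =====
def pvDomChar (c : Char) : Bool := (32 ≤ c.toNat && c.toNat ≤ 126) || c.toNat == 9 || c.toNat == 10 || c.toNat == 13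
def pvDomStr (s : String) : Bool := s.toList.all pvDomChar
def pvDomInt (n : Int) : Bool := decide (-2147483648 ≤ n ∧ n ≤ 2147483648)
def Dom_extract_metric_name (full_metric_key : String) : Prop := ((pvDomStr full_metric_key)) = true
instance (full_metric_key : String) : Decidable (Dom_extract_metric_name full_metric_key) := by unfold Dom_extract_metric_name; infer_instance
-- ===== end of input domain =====

-- B finds the leftmost marker as the minimum of per-marker first positions (list.index per
-- marker, then min, then one slice) instead of A's enumerate scan (objective: alternative).

-- ===== PORT A =====
def pvMetricTypes : PySem.Set String :=
  PySem.Set.ofList ["SASB", "Environment", "Social", "Governance", "Financial"]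

-- the 'for i, part in enumerate(parts)' loop of A (early return = returning from the recursion)
def pvScanA (full : String) (parts : List String) : List (Int × String) → String
  | [] => full
  | (i, part) :: rest =>
      if part ∈ pvMetricTypes then
        if part == "SASB" && decide (i + 1 < (parts.length : Int)) &&
            ((PySem.List.pyGet? parts (i + 1)).getD "" == "Metrics") then
          PySem.Str.join " " (PySem.List.slice parts (some (i + 2)) none)
        else
          PySem.Str.join " " (PySem.List.slice parts (some (i + 1)) none)
      else pvScanA full parts rest

def extract_metric_name (full_metric_key : String) : String :=
  let parts := (PySem.Chars.splitOn full_metric_key.toList ['_']).map String.ofList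
  pvScanA full_metric_key parts (PySem.List.enumerate parts)

-- ===== PORT B =====
def pvMarkersB : List String := ["SASB", "Environment", "Social", "Governance", "Financial"]

def extract_metric_name_alt (full_metric_key : String) : String :=
  let parts := (PySem.Chars.splitOn full_metric_key.toList ['_']).map String.ofList
  -- hits = [parts.index(m) for m in markers if m in parts]
  let hits := pvMarkersB.filterMap
    (fun m => if parts.contains m then PySem.List.index? parts m else none)
  -- 'if not hits: return full_metric_key' / 'i = min(hits)'
  match PySem.List.min? hits (fun x => x) with
  | none => full_metric_key
  | some i =>
      -- skip = 2 if parts[i] == "SASB" and parts[i+1:i+2] == ["Metrics"] else 1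
      let skip : Nat :=
        if (PySem.List.pyGetD parts (i : Int) "") == "SASB" &&
            PySem.List.slice parts (some ((i : Int) + 1)) (some ((i : Int) + 2)) == ["Metrics"]
        then 2 else 1
      PySem.Str.join " " (PySem.List.slice parts (some ((i + skip : Nat) : Int)) none)

-- ===== PRECONDITION & SPEC =====
def Spec_extract_metric_name (full_metric_key : String) (out : String) : Prop := out = extract_metric_name_alt full_metric_key
instance (full_metric_key : String) (out : String) : Decidable (Spec_extract_metric_name full_metric_key out) := by unfold Spec_extract_metric_name; infer_instance

-- ===== CLAIM (what is proved, stated in full; the proofs are below) =====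
def Claim_equal_extract_metric_name : Prop := ∀ (full_metric_key : String), Dom_extract_metric_name full_metric_key → Spec_extract_metric_name full_metric_key (extract_metric_name full_metric_key)

-- ===== LEMMAS AND PROOFS =====

-- common normal form of both programs: scan a token suffix for the first marker
def pvScanTok (full : String) : List String → String
  | [] => full
  | t :: rest =>
      if t ∈ pvMetricTypes then
        if t = "SASB" ∧ rest.headI = "Metrics" then PySem.Str.join " " rest.tail
        else PySem.Str.join " " rest
      else pvScanTok full rest

-- A-side: the enumerate loop is the suffix scan
theorem pvScanA_eq (full : String) :
    ∀ (suf pre : List String),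
      pvScanA full (pre ++ suf) (PySem.List.enumerate suf (pre.length : Int)) =
        pvScanTok full suf := by
  intro suf
  induction suf with
  | nil =>
    intro pre
    rw [PySem.List.enumerate, pvScanA, pvScanTok]
  | cons part rest' ih =>
    intro pre
    rw [PySem.List.enumerate, pvScanA, pvScanTok]
    by_cases hm : part ∈ pvMetricTypes
    · simp only [hm, if_true]
      cases rest' with
      | nil =>
        have hg : (part == "SASB" && decide ((pre.length : Int) + 1 < ((pre ++ [part]).length : Int)) &&
            ((PySem.List.pyGet? (pre ++ [part]) ((pre.length : Int) + 1)).getD "" == "Metrics")) = false := by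
          simp
        rw [hg]
        simp only [Bool.false_eq_true, if_false]
        have hc : ¬ (part = "SASB" ∧ (List.headI ([] : List String)) = "Metrics") := by
          intro hc
          have : ("" : String) = "Metrics" := hc.2
          simp at this
        simp only [hc, if_false]
        have hs : PySem.List.slice (pre ++ [part]) (some ((pre.length : Int) + 1)) none = [] := by
          have h1 : ((pre.length : Int) + 1) = ((pre.length + 1 : Nat) : Int) := by push_cast; ring
          rw [h1, PySem.List.slice_from _ (by omega)]
          have : ((pre.length + 1 : Nat) : Int).toNat = pre.length + 1 := by omega
          rw [this]
          have h2 : pre.length + 1 = (pre ++ [part]).length := by simp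
          rw [h2]
          simp
        rw [hs]
      | cons p2 rest'' =>
        have hget : PySem.List.pyGet? (pre ++ part :: p2 :: rest'') ((pre.length : Int) + 1) = some p2 := by
          have h1 : ((pre.length : Int) + 1) = ((pre.length + 1 : Nat) : Int) := by push_cast; ring
          rw [h1, PySem.List.pyGet?_natCast]
          rw [List.getElem?_append_right (by omega)]
          simp
        have hdrop1 : PySem.List.slice (pre ++ part :: p2 :: rest'') (some ((pre.length : Int) + 1)) none = p2 :: rest'' := by
          have h1 : ((pre.length : Int) + 1) = ((pre.length + 1 : Nat) : Int) := by push_cast; ring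
          rw [h1, PySem.List.slice_from _ (by omega)]
          have h2 : ((pre.length + 1 : Nat) : Int).toNat = pre.length + 1 := by omega
          rw [h2]
          have h3 : pre ++ part :: p2 :: rest'' = (pre ++ [part]) ++ p2 :: rest'' := by simp
          have h4 : pre.length + 1 = (pre ++ [part]).length := by simp
          rw [h3, h4, List.drop_left]
        have hdrop2 : PySem.List.slice (pre ++ part :: p2 :: rest'') (some ((pre.length : Int) + 2)) none = rest'' := by
          have h1 : ((pre.length : Int) + 2) = ((pre.length + 2 : Nat) : Int) := by push_cast; ring
          rw [h1, PySem.List.slice_from _ (by omega)]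
          have h2 : ((pre.length + 2 : Nat) : Int).toNat = pre.length + 2 := by omega
          rw [h2]
          have h3 : pre ++ part :: p2 :: rest'' = (pre ++ [part, p2]) ++ rest'' := by simp
          have h4 : pre.length + 2 = (pre ++ [part, p2]).length := by simp
          rw [h3, h4, List.drop_left]
        have hguard : (part == "SASB" && decide ((pre.length : Int) + 1 < ((pre ++ part :: p2 :: rest'').length : Int)) &&
            ((PySem.List.pyGet? (pre ++ part :: p2 :: rest'') ((pre.length : Int) + 1)).getD "" == "Metrics")) =
            decide (part = "SASB" ∧ (List.headI (p2 :: rest'')) = "Metrics") := by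
          rw [hget]
          by_cases h1 : part = "SASB" <;> by_cases h2 : p2 = "Metrics" <;> simp [h1, h2]
        rw [hguard]
        simp only [decide_eq_true_eq]
        by_cases hS : part = "SASB" ∧ (List.headI (p2 :: rest'')) = "Metrics"
        · rw [if_pos hS, if_pos hS, hdrop2]
          simp
        · rw [if_neg hS, if_neg hS, hdrop1]
    · simp only [hm, if_false]
      have h1 : ((pre.length : Int) + 1) = (((pre ++ [part]).length : Nat) : Int) := by simp
      rw [h1]
      have h2 : pre ++ part :: rest' = (pre ++ [part]) ++ rest' := by simp
      rw [h2]
      exact ih (pre ++ [part])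

-- membership in the ported set literal is membership in the marker list
theorem pvMem_markers (t : String) : t ∈ pvMetricTypes ↔ t ∈ pvMarkersB := by
  unfold pvMetricTypes pvMarkersB
  rw [PySem.Set.mem_ofList]

-- the suffix scan, characterised by findIdx?
theorem pvScanTok_none (full : String) (parts : List String)
    (h : parts.findIdx? (fun t => decide (t ∈ pvMetricTypes)) = none) :
    pvScanTok full parts = full := by
  induction parts with
  | nil => rfl
  | cons t rest ih =>
    rw [List.findIdx?_cons] at h
    by_cases hm : t ∈ pvMetricTypes
    · simp [hm] at h
    · rw [pvScanTok, if_neg hm]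
      exact ih (by simpa [hm] using h)

theorem pvScanTok_some (full : String) :
    ∀ (parts : List String) (i : Nat),
      parts.findIdx? (fun t => decide (t ∈ pvMetricTypes)) = some i →
      pvScanTok full parts =
        if parts.getD i "" = "SASB" ∧ (parts.drop (i + 1)).headI = "Metrics"
        then PySem.Str.join " " (parts.drop (i + 2))
        else PySem.Str.join " " (parts.drop (i + 1)) := by
  intro parts
  induction parts with
  | nil => intro i h; simp at h
  | cons t rest ih =>
    intro i h
    rw [List.findIdx?_cons] at h
    by_cases hm : t ∈ pvMetricTypes
    · simp only [hm, decide_true, if_true] at h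
      obtain rfl : 0 = i := by injection h
      rw [pvScanTok, if_pos hm]
      simp [List.tail]
    · simp only [hm, decide_false, Bool.false_eq_true, if_false, Option.map_eq_some_iff] at h
      obtain ⟨j, hj, rfl⟩ := h
      rw [pvScanTok, if_neg hm]
      rw [ih j hj]
      simp

-- extract the findIdx? facts
theorem pvFindIdx_spec {p : String → Bool} {parts : List String} {i : Nat}
    (h : parts.findIdx? p = some i) :
    ∃ hi : i < parts.length, p parts[i] = true ∧ ∀ j (hj : j < i), p (parts[j]'(by omega)) = false := by
  rw [List.findIdx?_eq_some_iff_getElem] at h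
  obtain ⟨hi, h1, h2⟩ := h
  exact ⟨hi, h1, fun j hj => by simpa using h2 j hj⟩

-- if take 1 of a list equals ["Metrics"], its head is "Metrics", and conversely
theorem pvTake1_eq (l : List String) :
    (l.take 1 = ["Metrics"]) ↔ l.headI = "Metrics" := by
  cases l with
  | nil => simp
  | cons a r => simp [List.take]

-- B's hits list: the findIdx? position occurs in it …
theorem pvHits_mem {parts : List String} {i : Nat}
    (h : parts.findIdx? (fun t => decide (t ∈ pvMetricTypes)) = some i) :
    i ∈ pvMarkersB.filterMap
      (fun m => if parts.contains m then PySem.List.index? parts m else none) := by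
  obtain ⟨hi, hpi, hmin⟩ := pvFindIdx_spec h
  have hm0 : parts[i] ∈ pvMetricTypes := by simpa using hpi
  rw [List.mem_filterMap]
  refine ⟨parts[i], (pvMem_markers _).mp hm0, ?_⟩
  have hc : parts.contains parts[i] = true := by
    simp [List.contains_eq_mem]
  rw [if_pos hc]
  -- index? parts parts[i] = some i
  cases hidx : PySem.List.index? parts parts[i] with
  | none =>
    rw [PySem.List.index?_eq_none_iff] at hidx
    exact absurd (List.getElem_mem hi) hidx
  | some k =>
    obtain ⟨hk, hpk, hfirst⟩ := PySem.List.getElem_of_index?_eq_some hidx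
    have hki : k = i := by
      rcases lt_trichotomy k i with hlt | heq | hgt
      · -- parts[k] is a marker before i: contradicts findIdx? minimality
        have := hmin k hlt
        rw [hpk] at this
        simp [hm0] at this
      · exact heq
      · -- parts[i] = parts[k] occurs before k: contradicts index? minimality
        exact absurd rfl (hfirst i hgt)
    rw [hki]

-- … and every element of it is ≥ the findIdx? position
theorem pvHits_lb {parts : List String} {i : Nat}
    (h : parts.findIdx? (fun t => decide (t ∈ pvMetricTypes)) = some i) :
    ∀ k ∈ pvMarkersB.filterMap
      (fun m => if parts.contains m then PySem.List.index? parts m else none), i ≤ k := by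
  obtain ⟨hi, hpi, hmin⟩ := pvFindIdx_spec h
  intro k hk
  rw [List.mem_filterMap] at hk
  obtain ⟨m, hmM, hval⟩ := hk
  by_cases hc : parts.contains m
  · rw [if_pos hc] at hval
    obtain ⟨hklen, hpk, -⟩ := PySem.List.getElem_of_index?_eq_some hval
    by_contra hlt
    push_neg at hlt
    have := hmin k hlt
    rw [hpk] at this
    simp [(pvMem_markers m).mpr hmM] at this
  · rw [if_neg hc] at hval
    exact absurd hval (by simp)

-- min of the hits list is exactly the findIdx? position
theorem pvMin_hits {parts : List String} :
    PySem.List.min?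
      (pvMarkersB.filterMap
        (fun m => if parts.contains m then PySem.List.index? parts m else none))
      (fun x => x) =
    parts.findIdx? (fun t => decide (t ∈ pvMetricTypes)) := by
  cases h : parts.findIdx? (fun t => decide (t ∈ pvMetricTypes)) with
  | none =>
    rw [PySem.List.min?_eq_none_iff]
    rw [List.findIdx?_eq_none_iff] at h
    rw [List.filterMap_eq_nil_iff]
    intro m hm
    have hnm : m ∉ parts := by
      intro hmp
      have := h m hmp
      simp [(pvMem_markers m).mpr hm] at this
    have hc : parts.contains m = false := by simpa [List.contains_eq_mem] using hnm
    simp only [hc, Bool.false_eq_true, if_false]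
  | some i =>
    cases hmin : PySem.List.min?
        (pvMarkersB.filterMap
          (fun m => if parts.contains m then PySem.List.index? parts m else none))
        (fun x => x) with
    | none =>
      rw [PySem.List.min?_eq_none_iff] at hmin
      have := pvHits_mem h
      rw [hmin] at this
      simp at this
    | some v =>
      have hv1 : v ∈ _ := PySem.List.min?_mem hmin
      have hv2 := PySem.List.min?_isMin hmin
      have hvi : v = i :=
        le_antisymm (by simpa using hv2 i (pvHits_mem h)) (pvHits_lb h v hv1)
      rw [hvi]

-- ===== VERDICT (by name: the statement is the Claim_ definition above) =====
theorem extract_metric_name_spec : Claim_equal_extract_metric_name := by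
  intro k _
  unfold Spec_extract_metric_name extract_metric_name extract_metric_name_alt
  generalize (PySem.Chars.splitOn k.toList ['_']).map String.ofList = parts
  have hA : pvScanA k parts (PySem.List.enumerate parts) = pvScanTok k parts := by
    have := pvScanA_eq k parts []
    simpa using this
  rw [hA]
  simp only [pvMin_hits]
  cases h : parts.findIdx? (fun t => decide (t ∈ pvMetricTypes)) with
  | none => exact pvScanTok_none k parts h
  | some i =>
    rw [pvScanTok_some k parts i h]
    obtain ⟨hi, -, -⟩ := pvFindIdx_spec h
    simp only
    have hget : PySem.List.pyGetD parts (i : Int) "" = parts.getD i "" := by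
      simp
    have hslice1 : PySem.List.slice parts (some ((i : Int) + 1)) (some ((i : Int) + 2)) =
        (parts.drop (i + 1)).take 1 := by
      have h1 : ((i : Int) + 1) = ((i + 1 : Nat) : Int) := by push_cast; ring
      have h2 : ((i : Int) + 2) = ((i + 2 : Nat) : Int) := by push_cast; ring
      rw [h1, h2, PySem.List.slice_natCast]
      congr 1
      omega
    have hguard : ((PySem.List.pyGetD parts (i : Int) "") == "SASB" &&
        (PySem.List.slice parts (some ((i : Int) + 1)) (some ((i : Int) + 2)) == ["Metrics"])) =
        decide (parts.getD i "" = "SASB" ∧ (parts.drop (i + 1)).headI = "Metrics") := by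
      rw [hget, hslice1, beq_eq_decide, beq_eq_decide]
      simp [pvTake1_eq, Bool.decide_and]
    rw [hguard, PySem.List.slice_from_natCast]
    by_cases hS : parts.getD i "" = "SASB" ∧ (parts.drop (i + 1)).headI = "Metrics"
    · have h1 : parts[i]?.getD "" = "SASB" := hS.1
      simp [h1, hS.2]
    · have h1 : ¬(parts[i]?.getD "" = "SASB" ∧ (parts.drop (i + 1)).headI = "Metrics") := hS
      simp [h1]
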